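-- pv_equiv track=rewrite | github.com/khaihanhtang/autoreg-for-homies | auto_registration_system/data_structure/reminder.py | check_valid_time_list
-- ===== SOURCE A (Python) =====
-- def check_valid_time_list(time_list: list[int]) -> bool:
--     for value in time_list:
--         if value <= 0:
--             return False
--     for i in range(1, len(time_list)):
--         if time_list[i - 1] <= time_list[i]:
--             return False
--     return True
-- ===== SOURCE B (Python) =====
-- def check_valid_time_list(time_list: list[int]) -> bool:
--     if not time_list:
--         return True
--     pairs_ok = all(a > b for a, b in zip(time_list, time_list[1:]))
--     return pairs_ok and time_list[-1] > 0
-- ===== Notes on version B (the rewrite author's own statement) =====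
-- stated objective: simpler
-- what changed: B drops A's separate positivity loop: it checks strict decrease once over consecutive pairs (zip) and then checks positivity of only the last element, which is the minimum of a strictly decreasing list.
import Mathlib
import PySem

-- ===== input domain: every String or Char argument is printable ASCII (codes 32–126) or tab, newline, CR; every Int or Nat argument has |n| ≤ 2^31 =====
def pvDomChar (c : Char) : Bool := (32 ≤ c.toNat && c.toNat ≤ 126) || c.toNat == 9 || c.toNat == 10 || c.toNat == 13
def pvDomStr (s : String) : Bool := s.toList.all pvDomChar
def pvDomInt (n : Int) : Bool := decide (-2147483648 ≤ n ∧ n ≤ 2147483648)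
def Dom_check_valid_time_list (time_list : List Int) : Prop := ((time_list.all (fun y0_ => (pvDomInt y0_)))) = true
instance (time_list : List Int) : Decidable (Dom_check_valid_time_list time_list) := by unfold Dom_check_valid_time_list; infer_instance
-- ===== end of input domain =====

-- B replaces A's separate positivity scan by a single consecutive-pair scan plus a positivity
-- test on the last element only (the minimum of a strictly decreasing list); objective: simpler.

-- ===== PORT A =====
-- second loop: for i in range(1, len(time_list)): if time_list[i-1] <= time_list[i]: return False
-- (indices i-1 and i are always in range here, so pyGetD with default 0 is exact)
def pvALoop2 (tl : List Int) : List Int → Bool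
  | [] => true
  | i :: rest =>
    if PySem.List.pyGetD tl (i - 1) 0 ≤ PySem.List.pyGetD tl i 0 then false
    else pvALoop2 tl rest

-- first loop: for value in time_list: if value <= 0: return False; then fall through to loop 2
def pvALoop1 (tl : List Int) : List Int → Bool
  | [] => pvALoop2 tl (PySem.List.pyRange 1 (tl.length : Int))
  | v :: rest => if v ≤ 0 then false else pvALoop1 tl rest

def check_valid_time_list (time_list : List Int) : Bool :=
  pvALoop1 time_list time_list

-- ===== PORT B =====
-- zip(time_list, time_list[1:]) is List.zip with the tail; time_list[-1] via pyGetD (list nonempty in that branch)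
def check_valid_time_list_alt (time_list : List Int) : Bool :=
  match time_list with
  | [] => true
  | _ :: _ =>
    ((time_list.zip time_list.tail).all (fun p => decide (p.1 > p.2)))
      && decide (PySem.List.pyGetD time_list (-1) 0 > 0)

-- ===== PRECONDITION & SPEC =====
def Spec_check_valid_time_list (time_list : List Int) (out : Bool) : Prop := out = check_valid_time_list_alt time_list
instance (time_list : List Int) (out : Bool) : Decidable (Spec_check_valid_time_list time_list out) := by unfold Spec_check_valid_time_list; infer_instance

-- ===== CLAIM (what is proved, stated in full; the proofs are below) =====
def Claim_equal_check_valid_time_list : Prop := ∀ (time_list : List Int), Dom_check_valid_time_list time_list → Spec_check_valid_time_list time_list (check_valid_time_list time_list)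

-- ===== LEMMAS AND PROOFS =====

-- A's first loop returns "all positive" && (result of the second loop)
lemma pvALoop1_eq (tl : List Int) (l : List Int) :
    pvALoop1 tl l = (l.all (fun v => decide (0 < v)) && pvALoop2 tl (PySem.List.pyRange 1 (tl.length : Int))) := by
  induction l with
  | nil => simp [pvALoop1]
  | cons v rest ih =>
    simp only [pvALoop1, List.all_cons]
    by_cases h : v ≤ 0
    · simp [h, show ¬ (0 < v) by omega]
    · simp [h, show 0 < v by omega, ih]

-- A's second loop is an `all` over its index list
lemma pvALoop2_eq_all (tl : List Int) (l : List Int) :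
    pvALoop2 tl l = l.all (fun i => decide (PySem.List.pyGetD tl i 0 < PySem.List.pyGetD tl (i - 1) 0)) := by
  induction l with
  | nil => rfl
  | cons i rest ih =>
    simp only [pvALoop2, List.all_cons, ih]
    by_cases h : PySem.List.pyGetD tl (i - 1) 0 ≤ PySem.List.pyGetD tl i 0
    · simp [h, show ¬ (PySem.List.pyGetD tl i 0 < PySem.List.pyGetD tl (i - 1) 0) by omega]
    · simp [h, show PySem.List.pyGetD tl i 0 < PySem.List.pyGetD tl (i - 1) 0 by omega]

-- the index-based pair scan equals the zip-based pair scan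
lemma pvPairs_eq (tl : List Int) :
    pvALoop2 tl (PySem.List.pyRange 1 (tl.length : Int))
      = (tl.zip tl.tail).all (fun p => decide (p.1 > p.2)) := by
  rw [pvALoop2_eq_all, Bool.eq_iff_iff]
  simp only [List.all_eq_true, PySem.List.mem_pyRange_one, decide_eq_true_eq, and_imp, gt_iff_lt]
  constructor
  · intro h p hp
    obtain ⟨k, hk, hpk⟩ := List.mem_iff_getElem.mp hp
    have hk' : k + 1 < tl.length := by
      simp only [List.length_zip, List.length_tail] at hk; omega
    have := h ((k : Int) + 1) (by omega) (by exact_mod_cast hk')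
    rw [PySem.List.pyGetD_eq_getElem tl 0 (by omega) (by exact_mod_cast hk'),
        show ((k : Int) + 1 - 1) = (k : Int) by ring,
        PySem.List.pyGetD_eq_getElem tl 0 (by omega) (by exact_mod_cast (by omega : k < tl.length))] at this
    rw [← hpk]
    simpa [List.getElem_zip, List.getElem_tail] using this
  · intro h i h1 h2
    have hlen : i.toNat - 1 < (tl.zip tl.tail).length := by
      simp only [List.length_zip, List.length_tail]; omega
    have hmem : (tl.zip tl.tail)[i.toNat - 1] ∈ tl.zip tl.tail := List.getElem_mem hlen
    have := h _ hmem
    simp only [List.getElem_zip, List.getElem_tail] at this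
    rw [PySem.List.pyGetD_eq_getElem tl 0 (by omega) h2,
        show (i - 1) = ((i.toNat - 1 : Nat) : Int) by omega,
        PySem.List.pyGetD_eq_getElem tl 0 (by omega) (by omega)]
    have hidx : i.toNat = i.toNat - 1 + 1 := by omega
    rw [show (i.toNat : Nat) = i.toNat - 1 + 1 from hidx] at *
    convert this using 2
    all_goals omega

-- in a strictly decreasing nonempty list, "all positive" is "last element positive"
lemma pvLastPos (x : Int) (xs : List Int) :
    ((x :: xs).zip xs).all (fun p => decide (p.1 > p.2)) = true →
    (x :: xs).all (fun v => decide (0 < v)) = decide (0 < (x :: xs).getLast?.getD 0) := by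
  induction xs generalizing x with
  | nil => intro _; simp
  | cons y ys ih =>
    intro h
    simp only [List.zip_cons_cons, List.all_cons, Bool.and_eq_true, decide_eq_true_eq, gt_iff_lt] at h
    have hrec := ih y (by simpa using h.2)
    have hlast : (x :: y :: ys).getLast?.getD 0 = (y :: ys).getLast?.getD 0 := by simp
    rw [List.all_cons, hrec, hlast]
    by_cases hl : 0 < (y :: ys).getLast?.getD 0
    · have hall : (y :: ys).all (fun v => decide (0 < v)) = true := by rw [hrec]; simpa using hl
      simp only [List.all_cons, Bool.and_eq_true, decide_eq_true_eq] at hall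
      simp [hl, show 0 < x by omega]
    · simp [hl]

theorem pv_main (tl : List Int) : check_valid_time_list tl = check_valid_time_list_alt tl := by
  rw [check_valid_time_list, pvALoop1_eq, pvPairs_eq]
  rcases tl with _ | ⟨x, xs⟩
  · rfl
  · simp only [check_valid_time_list_alt, List.tail_cons]
    rw [show PySem.List.pyGetD (x :: xs) (-1) 0 = (x :: xs).getLast?.getD 0 by
      simp [PySem.List.pyGetD, PySem.List.pyGet?_neg_one]]
    by_cases hz : ((x :: xs).zip xs).all (fun p => decide (p.1 > p.2)) = true
    · rw [hz, pvLastPos x xs hz]; simp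
    · rw [Bool.not_eq_true] at hz; simp [hz]

-- ===== VERDICT (by name: the statement is the Claim_ definition above) =====
theorem check_valid_time_list_spec : Claim_equal_check_valid_time_list := by
  intro tl _
  unfold Spec_check_valid_time_list
  exact pv_main tl
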